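-- pv_equiv track=rewrite | github.com/RomanMartin1/parcial2-mutantes | mutantes.py | recorrerColumnas
-- ===== SOURCE A (Python) =====
-- def recorrerColumnas(matriz):
--     filas = len(matriz)
--     recorrido = []
--     columnas = len(matriz[0])
--     for columna in range(columnas):
--         for fila in range(filas):
--             recorrido.append(matriz[fila][columna])
--     return CuatroConsecutivos(recorrido)
--
-- def  CuatroConsecutivos(lista):
--     contador = 0
--     for i in range(len(lista) - 3):
--         if lista[i] == lista[i + 1] == lista[i + 2] == lista[i + 3]:
--             contador = contador + 1
--     return contador
-- ===== SOURCE B (Python) =====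
-- def recorrerColumnas(matriz):
--     columnas = len(matriz[0])
--     recorrido = [matriz[fila][columna]
--                  for columna in range(columnas)
--                  for fila in range(len(matriz))]
--     contador = 0
--     run = 0
--     prev = None
--     for x in recorrido:
--         run = run + 1 if run and x == prev else 1
--         prev = x
--         if run >= 4:
--             contador += 1
--     return contador
-- ===== Notes on version B (the rewrite author's own statement) =====
-- stated objective: alternative
-- what changed: A counts windows by comparing lista[i..i+3] for every index with repeated indexing; B does a single run-length pass over the same column-major flattening, incrementing the counter whenever the current run of equal elements reaches length 4 or more.
import Mathlib
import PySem

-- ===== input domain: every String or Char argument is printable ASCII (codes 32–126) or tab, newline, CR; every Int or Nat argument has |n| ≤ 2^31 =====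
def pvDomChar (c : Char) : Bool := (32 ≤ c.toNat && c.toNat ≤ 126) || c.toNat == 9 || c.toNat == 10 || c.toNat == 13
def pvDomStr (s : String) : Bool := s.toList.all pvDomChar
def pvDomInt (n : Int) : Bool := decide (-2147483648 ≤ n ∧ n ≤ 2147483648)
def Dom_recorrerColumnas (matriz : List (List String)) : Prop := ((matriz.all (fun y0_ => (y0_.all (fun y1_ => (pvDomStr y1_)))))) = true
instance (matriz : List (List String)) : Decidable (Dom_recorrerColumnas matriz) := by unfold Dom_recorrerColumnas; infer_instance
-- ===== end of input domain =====

-- B replaces A's sliding-window comparison over indices by a single run-length pass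
-- over the same column-major flattening (objective: alternative counting strategy, same cost).

-- ===== PORT A =====
-- helper CuatroConsecutivos: window count over indices 0 .. len-4
def pvCuatroConsecutivos (lista : List String) : Int :=
  (PySem.List.pyRange 0 ((lista.length : Int) - 3) 1).foldl
    (fun contador i =>
      if PySem.List.pyGetD lista i "" = PySem.List.pyGetD lista (i+1) "" ∧
         PySem.List.pyGetD lista (i+1) "" = PySem.List.pyGetD lista (i+2) "" ∧
         PySem.List.pyGetD lista (i+2) "" = PySem.List.pyGetD lista (i+3) ""
      then contador + 1 else contador) 0

def recorrerColumnas (matriz : List (List String)) : Int :=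
  let filas : Int := matriz.length
  let columnas : Int := (PySem.List.pyGetD matriz 0 []).length
  let recorrido : List String :=
    (PySem.List.pyRange 0 columnas 1).foldl (fun acc columna =>
      (PySem.List.pyRange 0 filas 1).foldl (fun acc2 fila =>
        acc2 ++ [PySem.List.pyGetD (PySem.List.pyGetD matriz fila []) columna ""]) acc) []
  pvCuatroConsecutivos recorrido

-- ===== PORT B =====
-- run-length pass: state = (contador, run, prev)
def pvRunStep (s : Int × Int × Option String) (x : String) : Int × Int × Option String :=
  let run' : Int := if s.2.1 ≠ 0 ∧ s.2.2 = some x then s.2.1 + 1 else 1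
  (if 4 ≤ run' then s.1 + 1 else s.1, run', some x)

def recorrerColumnas_alt (matriz : List (List String)) : Int :=
  let columnas : Int := (PySem.List.pyGetD matriz 0 []).length
  let recorrido : List String :=
    (PySem.List.pyRange 0 columnas 1).flatMap (fun columna =>
      (PySem.List.pyRange 0 ((matriz.length : Int)) 1).map (fun fila =>
        PySem.List.pyGetD (PySem.List.pyGetD matriz fila []) columna ""))
  (recorrido.foldl pvRunStep (0, 0, none)).1

-- ===== PRECONDITION & SPEC =====
-- Pre_ excludes exactly the inputs where Python A raises IndexError: the empty
-- matrix (matriz[0]) and ragged matrices with a row shorter than row 0.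
def Pre_recorrerColumnas (matriz : List (List String)) : Prop :=
  matriz ≠ [] ∧ ∀ row ∈ matriz, (matriz.headD []).length ≤ row.length
instance (matriz : List (List String)) : Decidable (Pre_recorrerColumnas matriz) := by
  unfold Pre_recorrerColumnas; infer_instance
def pvWitness_recorrerColumnas : List (List String) := [["a","b"],["a","b"],["a","b"],["a","b"]]

def Spec_recorrerColumnas (matriz : List (List String)) (out : Int) : Prop := out = recorrerColumnas_alt matriz
instance (matriz : List (List String)) (out : Int) : Decidable (Spec_recorrerColumnas matriz out) := by unfold Spec_recorrerColumnas; infer_instance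

-- ===== CLAIM (what is proved, stated in full; the proofs are below) =====
def Claim_equal_recorrerColumnas : Prop := ∀ (matriz : List (List String)), Dom_recorrerColumnas matriz → Pre_recorrerColumnas matriz → Spec_recorrerColumnas matriz (recorrerColumnas matriz)

-- ===== LEMMAS AND PROOFS =====

-- indicator of a window of four equal elements at the head
def pvWin1 : List String → Int
  | a :: b :: c :: d :: _ => if a = b ∧ b = c ∧ c = d then 1 else 0
  | _ => 0

-- reference count: sum of the head-window indicators of all suffixes
def pvWinF : List String → Int
  | [] => 0
  | a :: t => pvWin1 (a :: t) + pvWinF t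

theorem pvWinF_cons (a : String) (t : List String) :
    pvWinF (a :: t) = pvWin1 (a :: t) + pvWinF t := rfl

theorem pvWin1_short (l : List String) (h : l.length ≤ 3) : pvWin1 l = 0 := by
  match l with
  | [] => rfl
  | [a] => rfl
  | [a, b] => rfl
  | [a, b, c] => rfl
  | a :: b :: c :: d :: rest => simp only [List.length_cons] at h; omega

theorem pvWin1_cons4 (a b c d : String) (t : List String) :
    pvWin1 (a :: b :: c :: d :: t) = if a = b ∧ b = c ∧ c = d then 1 else 0 := rfl

theorem pvWin1_ne1 (a b : String) (t : List String) (h : ¬ a = b) : pvWin1 (a :: b :: t) = 0 := by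
  match t with
  | [] => rfl
  | [c] => rfl
  | c :: d :: t' => rw [pvWin1_cons4, if_neg (fun hw => h hw.1)]

theorem pvWin1_ne2 (a b c : String) (t : List String) (h : ¬ b = c) : pvWin1 (a :: b :: c :: t) = 0 := by
  match t with
  | [] => rfl
  | d :: t' => rw [pvWin1_cons4, if_neg (fun hw => h hw.2.1)]

theorem pvWin1_ne3 (a b c d : String) (t : List String) (h : ¬ c = d) : pvWin1 (a :: b :: c :: d :: t) = 0 := by
  rw [pvWin1_cons4, if_neg (fun hw => h hw.2.2)]

theorem pvWinF_short (l : List String) (h : l.length ≤ 3) : pvWinF l = 0 := by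
  induction l with
  | nil => simp [pvWinF]
  | cons a t ih =>
    rw [pvWinF_cons, pvWin1_short _ (by simpa using h), ih (by simp at h; omega)]
    ring

-- window test over getD indices
def pvQ (l : List String) (k : Nat) : Bool :=
  decide (l.getD k "" = l.getD (k+1) "" ∧ l.getD (k+1) "" = l.getD (k+2) "" ∧ l.getD (k+2) "" = l.getD (k+3) "")

theorem pvCountP_eq_winF (l : List String) :
    ((List.range (l.length - 3)).countP (fun k => pvQ l k) : Int) = pvWinF l := by
  match l with
  | [] => simp [pvWinF]
  | [a] => simp [pvWinF, pvWin1]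
  | [a, b] => simp [pvWinF, pvWin1]
  | [a, b, c] => simp [pvWinF, pvWin1]
  | a :: b :: c :: d :: rest =>
    have ih := pvCountP_eq_winF (b :: c :: d :: rest)
    have hlen : (a :: b :: c :: d :: rest).length - 3 = ((b :: c :: d :: rest).length - 3) + 1 := by
      simp only [List.length_cons]; omega
    rw [hlen, List.range_succ_eq_map, List.countP_cons, List.countP_map]
    have hfun : ((fun k => pvQ (a :: b :: c :: d :: rest) k) ∘ (fun i => i + 1)) =
        (fun k => pvQ (b :: c :: d :: rest) k) := by
      funext k
      simp only [Function.comp_apply, pvQ]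
      rw [decide_eq_decide]
      simp
    rw [hfun]
    rw [pvWinF_cons, pvWin1_cons4, ← ih]
    have h0 : pvQ (a :: b :: c :: d :: rest) 0 = decide (a = b ∧ b = c ∧ c = d) := by
      simp only [pvQ]
      rw [decide_eq_decide]
      simp
    rw [h0]
    by_cases hw : a = b ∧ b = c ∧ c = d
    · simp only [hw, decide_true, if_true, and_self]
      push_cast
      ring
    · simp only [hw, decide_false, if_false]
      push_cast
      ring

theorem pvA_eq_winF (l : List String) : pvCuatroConsecutivos l = pvWinF l := by
  unfold pvCuatroConsecutivos
  rw [PySem.List.foldl_ite_add_one, PySem.List.pyRange_one]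
  have ht : ((l.length : Int) - 3 - 0).toNat = l.length - 3 := by omega
  rw [ht, List.countP_map]
  have hfun : ((fun i : Int =>
      decide (PySem.List.pyGetD l i "" = PySem.List.pyGetD l (i+1) "" ∧
        PySem.List.pyGetD l (i+1) "" = PySem.List.pyGetD l (i+2) "" ∧
        PySem.List.pyGetD l (i+2) "" = PySem.List.pyGetD l (i+3) "")) ∘ (fun k : Nat => (0:Int) + k)) =
      (fun k : Nat => pvQ l k) := by
    funext k
    simp only [Function.comp_apply, zero_add, pvQ]
    rw [decide_eq_decide]
    have h1 : (k : Int) + 1 = ((k + 1 : Nat) : Int) := by push_cast; ring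
    have h2 : (k : Int) + 2 = ((k + 2 : Nat) : Int) := by push_cast; ring
    have h3 : (k : Int) + 3 = ((k + 3 : Nat) : Int) := by push_cast; ring
    rw [h1, h2, h3]
    simp only [PySem.List.pyGetD_natCast]
  rw [hfun, pvCountP_eq_winF l]
  ring

-- mismatch absorption: a short run of p's before a different element contributes nothing
theorem pvWinF_mism (p x : String) (xs : List String) (hpx : ¬ p = x) (k : Nat) (hk : k ≤ 3) :
    pvWinF (List.replicate k p ++ x :: xs) = pvWinF (x :: xs) := by
  match k, hk with
  | 0, _ => rfl
  | 1, _ =>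
    have : List.replicate 1 p ++ x :: xs = p :: x :: xs := rfl
    rw [this, pvWinF_cons, pvWin1_ne1 _ _ _ hpx]
    ring
  | 2, _ =>
    have : List.replicate 2 p ++ x :: xs = p :: p :: x :: xs := rfl
    rw [this, pvWinF_cons, pvWin1_ne2 _ _ _ _ hpx, pvWinF_cons, pvWin1_ne1 _ _ _ hpx]
    ring
  | 3, _ =>
    have : List.replicate 3 p ++ x :: xs = p :: p :: p :: x :: xs := rfl
    rw [this, pvWinF_cons, pvWin1_ne3 _ _ _ _ _ hpx, pvWinF_cons, pvWin1_ne2 _ _ _ _ hpx,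
        pvWinF_cons, pvWin1_ne1 _ _ _ hpx]
    ring

-- invariant of the run-length fold
theorem pvRun_invariant (l : List String) : ∀ (c : Int) (r : Nat) (p : String), 1 ≤ r →
    (l.foldl pvRunStep (c, (r : Int), some p)).1 = c + pvWinF (List.replicate (min r 3) p ++ l) := by
  induction l with
  | nil =>
    intro c r p hr
    simp only [List.foldl_nil, List.append_nil]
    rw [pvWinF_short _ (by simp only [List.length_replicate]; omega)]
    ring
  | cons x xs ih =>
    intro c r p hr
    by_cases hx : p = x
    · subst hx
      have hr0 : r ≠ 0 := by omega
      have hstep : pvRunStep (c, (r : Int), some p) p =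
          (if 4 ≤ (r : Int) + 1 then c + 1 else c, (r : Int) + 1, some p) := by
        simp [pvRunStep, hr0]
      have hcast : (r : Int) + 1 = ((r + 1 : Nat) : Int) := by push_cast; ring
      rw [List.foldl_cons, hstep, hcast, ih _ (r + 1) p (by omega)]
      by_cases h3 : 3 ≤ r
      · have hm1 : min r 3 = 3 := by omega
        have hm2 : min (r + 1) 3 = 3 := by omega
        have hge : 4 ≤ ((r + 1 : Nat) : Int) := by push_cast; omega
        rw [hm1, hm2, if_pos hge]
        have e1 : List.replicate 3 p ++ p :: xs = p :: p :: p :: p :: xs := rfl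
        have e2 : List.replicate 3 p ++ xs = p :: p :: p :: xs := rfl
        rw [e1, e2, pvWinF_cons p (p :: p :: p :: xs), pvWin1_cons4,
            if_pos (show p = p ∧ p = p ∧ p = p from ⟨rfl, rfl, rfl⟩)]
        ring
      · have hlt : ¬ (4 ≤ ((r + 1 : Nat) : Int)) := by push_cast; omega
        rw [if_neg hlt]
        have hlists : List.replicate (min (r + 1) 3) p ++ xs = List.replicate (min r 3) p ++ p :: xs := by
          have hm1 : min r 3 = r := by omega
          have hm2 : min (r + 1) 3 = r + 1 := by omega
          rw [hm1, hm2, List.replicate_succ']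
          simp
        rw [hlists]
    · have hstep : pvRunStep (c, (r : Int), some p) x = (c, 1, some x) := by
        simp [pvRunStep, hx]
      have h1 : ((c : Int), (1 : Int), some x) = (c, ((1 : Nat) : Int), some x) := by norm_num
      rw [List.foldl_cons, hstep, h1, ih c 1 x (by omega)]
      rw [pvWinF_mism p x xs hx (min r 3) (by omega)]
      have : List.replicate (min 1 3) x ++ xs = x :: xs := rfl
      rw [this]

theorem pvB_eq_winF (l : List String) : (l.foldl pvRunStep (0, 0, none)).1 = pvWinF l := by
  match l with
  | [] => simp [pvWinF]
  | x :: xs =>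
    have hstep : pvRunStep (0, 0, none) x = (0, 1, some x) := by simp [pvRunStep]
    have h1 : ((0 : Int), (1 : Int), some x) = ((0 : Int), ((1 : Nat) : Int), some x) := by norm_num
    rw [List.foldl_cons, hstep, h1, pvRun_invariant xs 0 1 x (by omega)]
    have : List.replicate (min 1 3) x ++ xs = x :: xs := rfl
    rw [this]
    ring

-- the two flattenings build the same list
theorem pvRecorrido_eq (matriz : List (List String)) :
    (PySem.List.pyRange 0 ((PySem.List.pyGetD matriz 0 []).length : Int) 1).foldl (fun acc columna =>
      (PySem.List.pyRange 0 ((matriz.length : Int)) 1).foldl (fun acc2 fila =>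
        acc2 ++ [PySem.List.pyGetD (PySem.List.pyGetD matriz fila []) columna ""]) acc) [] =
    (PySem.List.pyRange 0 ((PySem.List.pyGetD matriz 0 []).length : Int) 1).flatMap (fun columna =>
      (PySem.List.pyRange 0 ((matriz.length : Int)) 1).map (fun fila =>
        PySem.List.pyGetD (PySem.List.pyGetD matriz fila []) columna "")) := by
  have hfn : (fun (acc : List String) (columna : Int) =>
      (PySem.List.pyRange 0 ((matriz.length : Int)) 1).foldl (fun acc2 fila =>
        acc2 ++ [PySem.List.pyGetD (PySem.List.pyGetD matriz fila []) columna ""]) acc) =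
      (fun (acc : List String) (columna : Int) =>
        acc ++ (PySem.List.pyRange 0 ((matriz.length : Int)) 1).map (fun fila =>
          PySem.List.pyGetD (PySem.List.pyGetD matriz fila []) columna "")) := by
    funext acc columna
    exact PySem.List.foldl_append_singleton_eq_map _ _ _
  rw [hfn, PySem.List.foldl_append_eq_flatMap]
  simp

theorem pvA_def (matriz : List (List String)) : recorrerColumnas matriz =
    pvCuatroConsecutivos
      ((PySem.List.pyRange 0 ((PySem.List.pyGetD matriz 0 []).length : Int) 1).foldl (fun acc columna =>
        (PySem.List.pyRange 0 ((matriz.length : Int)) 1).foldl (fun acc2 fila =>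
          acc2 ++ [PySem.List.pyGetD (PySem.List.pyGetD matriz fila []) columna ""]) acc) []) := rfl

theorem pvB_def (matriz : List (List String)) : recorrerColumnas_alt matriz =
    (((PySem.List.pyRange 0 ((PySem.List.pyGetD matriz 0 []).length : Int) 1).flatMap (fun columna =>
      (PySem.List.pyRange 0 ((matriz.length : Int)) 1).map (fun fila =>
        PySem.List.pyGetD (PySem.List.pyGetD matriz fila []) columna ""))).foldl pvRunStep (0, 0, none)).1 := rfl

-- ===== VERDICT (by name: the statement is the Claim_ definition above) =====
theorem recorrerColumnas_spec : Claim_equal_recorrerColumnas := by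
  intro matriz _ _
  unfold Spec_recorrerColumnas
  rw [pvA_def, pvB_def, pvRecorrido_eq, pvA_eq_winF, pvB_eq_winF]
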